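-- pv_equiv track=rewrite | github.com/AzRea7/onehaven | tools/repo/audit_product_cycles_phase85.py | owner_for_module
-- ===== SOURCE A (Python) =====
-- PRODUCT_PREFIXES = {
--     "compliance": "products.compliance.",
--     "ops": "products.ops.",
--     "acquire": "products.acquire.",
--     "intelligence": "products.intelligence.",
--     "tenants": "products.tenants.",
-- }
--
-- def owner_for_module(module: str) -> str | None:
--     for owner, prefix in PRODUCT_PREFIXES.items():
--         if module.startswith(prefix):
--             return owner
--     if module.startswith("onehaven_platform."):
--         return "platform"
--     if module.startswith("apps."):
--         return "app"
--     return None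
-- ===== SOURCE B (Python) =====
-- _PRODUCT_OWNERS = {"compliance", "ops", "acquire", "intelligence", "tenants"}
--
--
-- def owner_for_module(module: str) -> str | None:
--     if module.startswith("products."):
--         seg, dot, _rest = module[len("products."):].partition(".")
--         if dot and seg in _PRODUCT_OWNERS:
--             return seg
--         return None
--     if module.startswith("onehaven_platform."):
--         return "platform"
--     if module.startswith("apps."):
--         return "app"
--     return None
-- ===== Notes on version B (the rewrite author's own statement) =====
-- stated objective: idiomatic
-- what changed: Instead of scanning the five-entry prefix dict with startswith per entry, B parses the module path: after 'products.' it splits off the first dotted segment with partition and checks it against a set of owners.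
import Mathlib
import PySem

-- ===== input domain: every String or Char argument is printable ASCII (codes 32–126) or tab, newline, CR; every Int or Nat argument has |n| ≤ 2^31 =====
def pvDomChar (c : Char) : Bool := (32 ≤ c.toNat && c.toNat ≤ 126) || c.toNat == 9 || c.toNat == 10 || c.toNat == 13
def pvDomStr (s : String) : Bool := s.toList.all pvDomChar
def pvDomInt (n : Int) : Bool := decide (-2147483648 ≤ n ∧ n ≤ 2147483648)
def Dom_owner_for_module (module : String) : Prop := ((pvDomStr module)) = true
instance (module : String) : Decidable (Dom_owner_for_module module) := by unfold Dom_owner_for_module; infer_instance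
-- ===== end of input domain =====

-- B replaces the per-entry startswith scan of the prefix dict by parsing: split off the first
-- dotted segment after "products." and look it up in a set of owners (idiomatic, same cost class).


-- ===== PORT A =====
def PRODUCT_PREFIXES : List (String × String) :=
  [("compliance", "products.compliance."),
   ("ops", "products.ops."),
   ("acquire", "products.acquire."),
   ("intelligence", "products.intelligence."),
   ("tenants", "products.tenants.")]

-- the 'for owner, prefix in PRODUCT_PREFIXES.items(): if module.startswith(prefix): return owner' loop
def ownerLoop (pairs : List (String × String)) (module : String) : Option String :=
  match pairs with
  | [] => none
  | (owner, pre) :: rest =>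
      if PySem.Str.startswith module pre then some owner else ownerLoop rest module

def owner_for_module (module : String) : Option String :=
  match ownerLoop PRODUCT_PREFIXES module with
  | some owner => some owner
  | none =>
      if PySem.Str.startswith module "onehaven_platform." then some "platform"
      else if PySem.Str.startswith module "apps." then some "app"
      else none

-- ===== PORT B =====
def PRODUCT_OWNERS : PySem.Set String :=
  PySem.Set.ofList ["compliance", "ops", "acquire", "intelligence", "tenants"]

def owner_for_module_alt (module : String) : Option String :=
  let l := module.toList
  if PySem.Chars.startswith l "products.".toList then
    -- module[len("products."):].partition(".")  (len("products.") = 9)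
    let rest := l.drop 9
    let seg := rest.takeWhile (fun c => c ≠ '.')
    let dot := rest.dropWhile (fun c => c ≠ '.')
    if dot ≠ [] ∧ String.ofList seg ∈ PRODUCT_OWNERS then some (String.ofList seg) else none
  else if PySem.Chars.startswith l "onehaven_platform.".toList then some "platform"
  else if PySem.Chars.startswith l "apps.".toList then some "app"
  else none

-- ===== PRECONDITION & SPEC =====
def Spec_owner_for_module (module : String) (out : Option String) : Prop := out = owner_for_module_alt module
instance (module : String) (out : Option String) : Decidable (Spec_owner_for_module module out) := by unfold Spec_owner_for_module; infer_instance

-- ===== CLAIM (what is proved, stated in full; the proofs are below) =====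
def Claim_equal_owner_for_module : Prop := ∀ (module : String), Dom_owner_for_module module → Spec_owner_for_module module (owner_for_module module)

-- ===== LEMMAS AND PROOFS =====

-- "s followed by a dot is a prefix of t" ↔ "t's first dot-segment is exactly s and t has a dot",
-- for s containing no dot: the bridge between A's startswith test and B's partition.
theorem prefix_dot_iff (s t : List Char) (hs : '.' ∉ s) :
    (s ++ ['.']) <+: t ↔
      t.takeWhile (fun c => c ≠ '.') = s ∧ t.dropWhile (fun c => c ≠ '.') ≠ [] := by
  induction s generalizing t with
  | nil =>
      cases t with
      | nil => simp
      | cons c t' =>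
          by_cases hc : c = '.'
          · subst hc; simp [List.takeWhile, List.dropWhile, List.cons_prefix_cons]
          · simp [List.takeWhile, List.dropWhile, hc, List.cons_prefix_cons]
            exact fun h => hc h.symm
  | cons a s' ih =>
      have ha : a ≠ '.' := fun h => hs (h ▸ List.mem_cons_self)
      have hs' : '.' ∉ s' := fun h => hs (List.mem_cons_of_mem _ h)
      cases t with
      | nil => simp
      | cons c t' =>
          by_cases hc : c = '.'
          · subst hc
            simp [List.takeWhile, List.dropWhile, List.cons_prefix_cons, ha]
          · simp [List.takeWhile, List.dropWhile, hc, List.cons_prefix_cons, ih t' hs',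
              and_assoc]
            exact fun _ _ => eq_comm

-- the same bridge in simp-normal form ('.'-free predicate as !decide, dot-piece as membership)
theorem prefix_dot_iff' (s t : List Char) (hs : '.' ∉ s) :
    (s ++ ['.']) <+: t ↔
      t.takeWhile (fun c => !decide (c = '.')) = s ∧ '.' ∈ t := by
  rw [prefix_dot_iff s t hs]; simp [List.dropWhile_eq_nil_iff]

-- glue: Chars.startswith as a decide of List prefix (both directions of startswith_iff at once)
theorem startswith_eq_decide (X Y : List Char) :
    PySem.Chars.startswith X Y = decide (Y <+: X) := by
  by_cases h : Y <+: X
  · simp [PySem.Chars.startswith_iff, h]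
  · simp only [h, decide_false]
    rw [← Bool.not_eq_true, PySem.Chars.startswith_iff]
    exact h

theorem owner_for_module_main (module : String) :
    owner_for_module module = owner_for_module_alt module := by
  simp only [owner_for_module, owner_for_module_alt, ownerLoop, PRODUCT_PREFIXES,
    PySem.Str.startswith_eq, startswith_eq_decide, decide_eq_true_eq]
  by_cases hp : ("products.".toList <+: module.toList)
  · obtain ⟨t, ht⟩ := hp
    simp only [← ht]
    have hdrop : ("products.".toList ++ t).drop 9 = t := by
      simp
    have hplat : ¬ ("onehaven_platform.".toList <+: "products.".toList ++ t) := by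
      intro h; simp [List.cons_prefix_cons] at h
    have happ : ¬ ("apps.".toList <+: "products.".toList ++ t) := by
      intro h; simp [List.cons_prefix_cons] at h
    have hprod : ("products.".toList <+: "products.".toList ++ t) := List.prefix_append _ _
    rw [show ("products.compliance.".toList : List Char)
          = "products.".toList ++ ("compliance".toList ++ ['.']) from by decide,
        show ("products.ops.".toList : List Char)
          = "products.".toList ++ ("ops".toList ++ ['.']) from by decide,
        show ("products.acquire.".toList : List Char)
          = "products.".toList ++ ("acquire".toList ++ ['.']) from by decide,
        show ("products.intelligence.".toList : List Char)
          = "products.".toList ++ ("intelligence".toList ++ ['.']) from by decide,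
        show ("products.tenants.".toList : List Char)
          = "products.".toList ++ ("tenants".toList ++ ['.']) from by decide,
        hdrop]
    simp only [List.prefix_append_right_inj, hplat, hprod, happ, if_true, if_false]
    by_cases h1 : (['c','o','m','p','l','i','a','n','c','e','.'] : List Char) <+: t
    · have := (prefix_dot_iff' "compliance".toList t (by decide)).mp h1
      simp [h1, this.1, this.2, PRODUCT_OWNERS, PySem.Set.ofList]
    · by_cases h2 : (['o','p','s','.'] : List Char) <+: t
      · have := (prefix_dot_iff' "ops".toList t (by decide)).mp h2
        simp [h1, h2, this.1, this.2, PRODUCT_OWNERS, PySem.Set.ofList]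
      · by_cases h3 : (['a','c','q','u','i','r','e','.'] : List Char) <+: t
        · have := (prefix_dot_iff' "acquire".toList t (by decide)).mp h3
          simp [h1, h2, h3, this.1, this.2, PRODUCT_OWNERS, PySem.Set.ofList]
        · by_cases h4 : (['i','n','t','e','l','l','i','g','e','n','c','e','.'] : List Char) <+: t
          · have := (prefix_dot_iff' "intelligence".toList t (by decide)).mp h4
            simp [h1, h2, h3, h4, this.1, this.2, PRODUCT_OWNERS, PySem.Set.ofList]
          · by_cases h5 : (['t','e','n','a','n','t','s','.'] : List Char) <+: t
            · have := (prefix_dot_iff' "tenants".toList t (by decide)).mp h5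
              simp [h1, h2, h3, h4, h5, this.1, this.2, PRODUCT_OWNERS, PySem.Set.ofList]
            · have e1 : ("compliance".toList ++ ['.'] <+: t) = False := eq_false h1
              have e2 : ("ops".toList ++ ['.'] <+: t) = False := eq_false h2
              have e3 : ("acquire".toList ++ ['.'] <+: t) = False := eq_false h3
              have e4 : ("intelligence".toList ++ ['.'] <+: t) = False := eq_false h4
              have e5 : ("tenants".toList ++ ['.'] <+: t) = False := eq_false h5
              simp only [e1, e2, e3, e4, e5, if_false]
              rw [eq_comm, if_neg]
              rintro ⟨hdot, hmem⟩
              simp [List.dropWhile_eq_nil_iff] at hdot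
              simp [PRODUCT_OWNERS, PySem.Set.ofList, String.ofList_eq] at hmem
              rcases hmem with h | h | h | h | h <;>
                [exact h1 ((prefix_dot_iff' _ t (by decide)).mpr ⟨h, hdot⟩);
                 exact h2 ((prefix_dot_iff' _ t (by decide)).mpr ⟨h, hdot⟩);
                 exact h3 ((prefix_dot_iff' _ t (by decide)).mpr ⟨h, hdot⟩);
                 exact h4 ((prefix_dot_iff' _ t (by decide)).mpr ⟨h, hdot⟩);
                 exact h5 ((prefix_dot_iff' _ t (by decide)).mpr ⟨h, hdot⟩)]
  · have hfive : ∀ (p : List Char), "products.".toList <+: p →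
        ¬ (p <+: module.toList) :=
      fun p hpre h => hp (hpre.trans h)
    simp only [hp, hfive "products.compliance.".toList (by decide),
      hfive "products.ops.".toList (by decide),
      hfive "products.acquire.".toList (by decide),
      hfive "products.intelligence.".toList (by decide),
      hfive "products.tenants.".toList (by decide), if_false]

-- ===== VERDICT (by name: the statement is the Claim_ definition above) =====
theorem owner_for_module_spec : Claim_equal_owner_for_module := by
  intro module _
  unfold Spec_owner_for_module
  exact owner_for_module_main module
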